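-- pv_equiv track=rewrite | github.com/azinit/FIOS | util/fstring.py | compute_distance
-- ===== SOURCE A (Python) =====
-- def only_letters(term: str, **options):
--     """ Format string from odd characters """
--     def __is_valid_gap(char: str):
--         # TODO: Last char?
--         return formatted[-1] != " " and char == " "
--
--     def __is_valid_digit(char: str):
--         return allow_digit and char.isdigit()
--
--     allow_digit     = options.get("allow_digit",    False)
--     gap_dot         = options.get("gap_dot",        False)
--     remove_domains  = options.get("remove_domains", False)
--
--     if remove_domains:
--         from fios.enums import web
--         for domain in web.get_domain_zones():
--             term = term.replace(domain, " ")
--     if gap_dot:     term = term.replace(".", " ")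
--
--     formatted = ""
--     term      = term.strip()
--     # removing odd chars
--     for char in term:
--         if char.isalpha() or __is_valid_gap(char) or __is_valid_digit(char):
--             formatted += char
--
--     # remove odd gap
--     if formatted[-1] == " ": formatted = formatted[:-1:]
--     return formatted
--
-- def compute_distance(token_1: str, token_2: str, term: str, **options):
--     """ Compute two tokens distance in term """
--     tokens = only_letters(term.lower(), allow_digit=True).split(" ")
--
--     indices_1 = [i for i, t in enumerate(tokens) if t == token_1]
--     indices_2 = [j for j, t in enumerate(tokens) if t == token_2]
--     if indices_1 and indices_2:
--         differences = []
--         for ind_1 in indices_1: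
--             for ind_2 in indices_2:
--                 differences.append(abs(ind_1 - ind_2))
--         return min(differences)
--     else:
--         return None
-- ===== SOURCE B (Python) =====
-- def compute_distance(token_1: str, token_2: str, term: str, **options):
--     """ Compute two tokens distance in term """
--     # Tokenize in one pass: keep alphanumeric chars, a space closes the
--     # current token; other characters are dropped.
--     tokens = []
--     cur = []
--     for ch in term.lower().strip():
--         if ch.isalnum():
--             cur.append(ch)
--         elif ch == " " and cur:
--             tokens.append("".join(cur))
--             cur = []
--     if cur:
--         tokens.append("".join(cur))
--
--     # One pass over the tokens: the nearest pair is always (current index,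
--     # last seen index of the other token), so no index lists are needed.
--     best = None
--     last1 = None
--     last2 = None
--     for i, t in enumerate(tokens):
--         if t == token_1:
--             last1 = i
--             if last2 is not None and (best is None or i - last2 < best):
--                 best = i - last2
--         if t == token_2:
--             last2 = i
--             if last1 is not None and (best is None or i - last1 < best):
--                 best = i - last1
--     return best
-- ===== Notes on version B (the rewrite author's own statement) =====
-- stated objective: faster
-- what changed: B tokenizes in a single pass without building the intermediate formatted string, and computes the minimum index distance in one pass over the tokens by tracking the last seen index of each token, instead of building both index lists and taking min over all |i-j| pairs.
import Mathlib
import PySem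

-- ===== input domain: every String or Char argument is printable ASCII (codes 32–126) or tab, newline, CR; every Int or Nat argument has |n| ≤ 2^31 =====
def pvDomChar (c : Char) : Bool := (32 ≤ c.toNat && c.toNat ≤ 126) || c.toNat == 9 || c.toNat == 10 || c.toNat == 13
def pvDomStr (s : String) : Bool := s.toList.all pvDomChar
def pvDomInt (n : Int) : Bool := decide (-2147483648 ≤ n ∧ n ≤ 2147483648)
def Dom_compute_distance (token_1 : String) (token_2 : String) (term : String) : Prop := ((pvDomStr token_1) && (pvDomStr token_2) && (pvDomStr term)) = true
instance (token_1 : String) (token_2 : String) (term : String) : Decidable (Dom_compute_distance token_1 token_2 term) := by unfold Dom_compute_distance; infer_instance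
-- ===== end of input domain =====

-- B replaces A's index-list construction and nested min-over-all-pairs loop by a single
-- pass over the tokens tracking the last seen index of each token (measured faster,
-- asymptotically on duplicate-heavy terms); return value only, no mutation involved.

-- ===== PORT A =====
-- only_letters, with the options compute_distance passes: allow_digit is a parameter
-- (compute_distance passes True); gap_dot and remove_domains keep their default False,
-- so those two dead branches are omitted. Returns none exactly where Python raises
-- IndexError (formatted[-1] on an empty formatted string).
def pvStepA (allow_digit : Bool) (acc : Option (List Char)) (char : Char) : Option (List Char) :=
  match acc with
  | none => none
  | some formatted =>
    if PySem.Chars.isalpha char then some (formatted ++ [char])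
    else
      -- __is_valid_gap: formatted[-1] != " " and char == " "  (formatted[-1] may raise)
      match PySem.List.pyGet? formatted (-1) with
      | none => none
      | some last =>
        if last ≠ ' ' ∧ char = ' ' then some (formatted ++ [char])
        else if allow_digit ∧ PySem.Chars.isdigit char then some (formatted ++ [char])
        else some formatted

def pvOnlyLetters (term0 : List Char) (allow_digit : Bool) : Option (List Char) :=
  let term := PySem.Chars.strip term0
  match term.foldl (pvStepA allow_digit) (some []) with
  | none => none
  | some formatted =>
    -- if formatted[-1] == " ": formatted = formatted[:-1:]   (formatted[-1] may raise)
    match PySem.List.pyGet? formatted (-1) with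
    | none => none
    | some last => some (if last = ' ' then PySem.List.slice formatted none (some (-1)) else formatted)

def compute_distance (token_1 : String) (token_2 : String) (term : String) : Option Int :=
  match pvOnlyLetters (PySem.Str.lower term).toList true with
  | none => none   -- Python raised IndexError here; such inputs are outside Pre_
  | some f =>
    let tokens := PySem.Chars.splitOn f [' ']
    let indices_1 := ((PySem.List.enumerate tokens 0).filter (fun p => p.2 == token_1.toList)).map (fun p => p.1)
    let indices_2 := ((PySem.List.enumerate tokens 0).filter (fun p => p.2 == token_2.toList)).map (fun p => p.1)
    if indices_1 ≠ [] ∧ indices_2 ≠ [] then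
      let differences := indices_1.foldl (fun acc ind_1 =>
        indices_2.foldl (fun acc ind_2 => acc ++ [|ind_1 - ind_2|]) acc) []
      PySem.List.min? differences (fun x => x)
    else none

-- ===== PORT B =====
-- one tokenizing pass: alnum chars extend the current token, a space closes it
def pvStepTok (st : List (List Char) × List Char) (ch : Char) : List (List Char) × List Char :=
  if PySem.Chars.isalnum ch then (st.1, st.2 ++ [ch])
  else if ch = ' ' ∧ st.2 ≠ [] then (st.1 ++ [st.2], [])
  else st

-- best = i - last if last is set and improves best  (the two identical updates in Source B)
def pvUpd (best : Option Int) (last : Option Int) (i : Int) : Option Int :=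
  match last, best with
  | some j, none => some (i - j)
  | some j, some b => if i - j < b then some (i - j) else some b
  | none, _ => best

-- state (best, last1, last2)
def pvStepDist (t1 t2 : List Char) (st : Option Int × Option Int × Option Int)
    (p : Int × List Char) : Option Int × Option Int × Option Int :=
  let st1 := if p.2 == t1 then (pvUpd st.1 st.2.2 p.1, some p.1, st.2.2) else st
  if p.2 == t2 then (pvUpd st1.1 st1.2.1 p.1, st1.2.1, some p.1) else st1

def compute_distance_alt (token_1 : String) (token_2 : String) (term : String) : Option Int :=
  let s := PySem.Chars.strip (PySem.Chars.lower term.toList)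
  let st := s.foldl pvStepTok ([], [])
  let tokens := if st.2 ≠ [] then st.1 ++ [st.2] else st.1
  ((PySem.List.enumerate tokens 0).foldl (pvStepDist token_1.toList token_2.toList)
    (none, none, none)).1

-- ===== PRECONDITION & SPEC =====
-- Pre_ excludes exactly the inputs where A raises IndexError: the lowered, stripped term
-- is empty or starts with a non-letter (then formatted[-1] is evaluated on "").
def Pre_compute_distance (token_1 : String) (token_2 : String) (term : String) : Prop :=
  PySem.Chars.strip (PySem.Chars.lower term.toList) ≠ [] ∧
  PySem.Chars.isalpha (PySem.Chars.strip (PySem.Chars.lower term.toList)).headI = true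
instance (token_1 : String) (token_2 : String) (term : String) : Decidable (Pre_compute_distance token_1 token_2 term) := by unfold Pre_compute_distance; infer_instance

def pvWitness_compute_distance : String × String × String := ("a", "b", "c a x b a")

def Spec_compute_distance (token_1 : String) (token_2 : String) (term : String) (out : Option Int) : Prop := out = compute_distance_alt token_1 token_2 term
instance (token_1 : String) (token_2 : String) (term : String) (out : Option Int) : Decidable (Spec_compute_distance token_1 token_2 term out) := by unfold Spec_compute_distance; infer_instance

-- ===== CLAIM (what is proved, stated in full; the proofs are below) =====
def Claim_equal_compute_distance : Prop := ∀ (token_1 : String) (token_2 : String) (term : String), Dom_compute_distance token_1 token_2 term → Pre_compute_distance token_1 token_2 term → Spec_compute_distance token_1 token_2 term (compute_distance token_1 token_2 term)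

-- ===== LEMMAS AND PROOFS =====

-- ---- tokenization side ----

def tokSplit : List Char → List (List Char)
  | [] => [[]]
  | c :: rest =>
    if c = ' ' then [] :: tokSplit rest
    else match tokSplit rest with
      | [] => [[c]]
      | t :: ts => (c :: t) :: ts

lemma tokSplit_ne_nil (l : List Char) : tokSplit l ≠ [] := by
  cases l with
  | nil => simp [tokSplit]
  | cons c rest =>
    simp only [tokSplit]
    split
    · simp
    · split <;> simp

lemma go_eq (l : List Char) : ∀ (fuel : Nat) (cur : List Char) (accs : List (List Char)),
    l.length < fuel →
    PySem.Chars.splitOn.go [' '] fuel l cur accs =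
      accs.reverse ++ (match tokSplit l with
        | [] => []
        | t :: ts => (cur.reverse ++ t) :: ts) := by
  induction l with
  | nil =>
    intro fuel cur accs hf
    cases fuel with
    | zero => omega
    | succ f => simp [PySem.Chars.splitOn.go, tokSplit]
  | cons c rest ih =>
    intro fuel cur accs hf
    cases fuel with
    | zero => omega
    | succ f =>
      rw [PySem.Chars.splitOn.go]
      by_cases hc : c = ' '
      · subst hc
        have hpre : [' '].isPrefixOf (' ' :: rest) = true := by simp [List.isPrefixOf]
        simp only [hpre, if_pos]
        have h1 : List.drop [' '].length (' ' :: rest) = rest := by simp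
        rw [h1, ih f [] (cur.reverse :: accs) (by simp at hf; omega)]
        simp only [tokSplit, if_pos rfl]
        rcases hts : tokSplit rest with _ | ⟨t, ts⟩
        · exact absurd hts (tokSplit_ne_nil rest)
        · simp
      · have hpre : [' '].isPrefixOf (c :: rest) = false := by
          simp [List.isPrefixOf]
          exact fun h => absurd h.symm hc
        simp only [hpre, Bool.false_eq_true, if_neg, not_false_iff]
        rw [ih f (c :: cur) accs (by simp at hf ⊢; omega)]
        simp only [tokSplit, if_neg hc]
        rcases hts : tokSplit rest with _ | ⟨t, ts⟩
        · exact absurd hts (tokSplit_ne_nil rest)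
        · simp

lemma splitOn_eq_tokSplit (f : List Char) : PySem.Chars.splitOn f [' '] = tokSplit f := by
  unfold PySem.Chars.splitOn
  rw [go_eq f (f.length + 1) [] [] (by omega)]
  rcases hts : tokSplit f with _ | ⟨t, ts⟩
  · exact absurd hts (tokSplit_ne_nil f)
  · simp

lemma tokSplit_append_space (f : List Char) : tokSplit (f ++ [' ']) = tokSplit f ++ [[]] := by
  induction f with
  | nil => simp [tokSplit]
  | cons c rest ih =>
    by_cases hc : c = ' '
    · subst hc; simp [tokSplit, ih]
    · simp only [List.cons_append, tokSplit, if_neg hc, ih]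
      rcases hts : tokSplit rest with _ | ⟨t, ts⟩
      · exact absurd hts (tokSplit_ne_nil rest)
      · simp


def modLast (c : Char) : List (List Char) → List (List Char)
  | [] => []
  | [t] => [t ++ [c]]
  | t :: ts => t :: modLast c ts

lemma modLast_cons (c : Char) (t : List Char) (ts : List (List Char)) (h : ts ≠ []) :
    modLast c (t :: ts) = t :: modLast c ts := by
  cases ts with
  | nil => exact absurd rfl h
  | cons a b => rfl

lemma modLast_append (c : Char) (tks : List (List Char)) (cur : List Char) :
    modLast c (tks ++ [cur]) = tks ++ [cur ++ [c]] := by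
  induction tks with
  | nil => rfl
  | cons x xs ih => rw [List.cons_append, modLast_cons c x (xs ++ [cur]) (by simp), ih]; rfl

lemma tokSplit_append_char (f : List Char) (c : Char) (hc : c ≠ ' ') :
    tokSplit (f ++ [c]) = modLast c (tokSplit f) := by
  induction f with
  | nil => simp [tokSplit, if_neg hc, modLast]
  | cons d rest ih =>
    by_cases hd : d = ' '
    · subst hd
      simp only [List.cons_append, tokSplit, reduceIte, ih]
      rw [modLast_cons c [] (tokSplit rest) (tokSplit_ne_nil rest)]
    · simp only [List.cons_append, tokSplit, if_neg hd, ih]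
      rcases hts : tokSplit rest with _ | ⟨t, ts⟩
      · exact absurd hts (tokSplit_ne_nil rest)
      · cases ts with
        | nil => simp [modLast]
        | cons a b =>
          rw [modLast_cons c t (a :: b) (by simp), modLast_cons c (d :: t) (a :: b) (by simp)]

lemma isalpha_ne_space {c : Char} (h : PySem.Chars.isalpha c = true) : c ≠ ' ' := by
  intro hc; rw [hc] at h; exact absurd h (by decide)

lemma pyGet?_neg_one (l : List Char) : PySem.List.pyGet? l (-1) = l.getLast? := by
  cases l with
  | nil => rfl
  | cons x xs => simp [PySem.List.pyGet?, PySem.List.pyIdx?, List.getLast?_eq_getElem?]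

lemma loops_agree (rest : List Char) : ∀ (f : List Char) (tks : List (List Char)) (cur : List Char),
    f ≠ [] → tokSplit f = tks ++ [cur] → ((f.getLast? = some ' ') ↔ cur = []) →
    ∃ f', rest.foldl (pvStepA true) (some f) = some f' ∧ f' ≠ [] ∧
      tokSplit f' = (rest.foldl pvStepTok (tks, cur)).1 ++ [(rest.foldl pvStepTok (tks, cur)).2] ∧
      ((f'.getLast? = some ' ') ↔ (rest.foldl pvStepTok (tks, cur)).2 = []) := by
  induction rest with
  | nil => intro f tks cur h1 h2 h3; exact ⟨f, rfl, h1, by simpa using ⟨h2, h3⟩⟩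
  | cons c rest ih =>
    intro f tks cur h1 h2 h3
    simp only [List.foldl_cons]
    by_cases ha : PySem.Chars.isalpha c = true
    · -- alpha: A appends, B extends cur
      have hc : c ≠ ' ' := isalpha_ne_space ha
      have hA : pvStepA true (some f) c = some (f ++ [c]) := by
        simp [pvStepA, ha]
      have hB : pvStepTok (tks, cur) c = (tks, cur ++ [c]) := by
        simp [pvStepTok, PySem.Chars.isalnum, ha]
      rw [hA, hB]
      apply ih (f ++ [c]) tks (cur ++ [c]) (by simp)
      · rw [tokSplit_append_char f c hc, h2, modLast_append]
      · simp [List.getLast?_concat, hc]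
    · by_cases hsp : c = ' '
      · subst hsp
        by_cases hcur : cur = []
        · -- last char is a space: both sides unchanged
          have hlast : f.getLast? = some ' ' := h3.mpr hcur
          have hA : pvStepA true (some f) ' ' = some f := by
            simp [pvStepA, ha, pyGet?_neg_one, hlast,
              (show PySem.Chars.isdigit ' ' = false by decide)]
          have hB : pvStepTok (tks, cur) ' ' = (tks, cur) := by
            simp [pvStepTok, hcur, (show PySem.Chars.isalnum ' ' = false by decide)]
          rw [hA, hB]
          exact ih f tks cur h1 h2 h3
        · -- A appends a space, B closes the token
          obtain ⟨last, hlast⟩ : ∃ l, f.getLast? = some l := by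
            cases hf : f.getLast? with
            | none => exact absurd (List.getLast?_eq_none_iff.mp hf) h1
            | some l => exact ⟨l, rfl⟩
          have hne : last ≠ ' ' := by
            intro hE; rw [hE] at hlast; exact hcur (h3.mp hlast)
          have hA : pvStepA true (some f) ' ' = some (f ++ [' ']) := by
            simp [pvStepA, ha, pyGet?_neg_one, hlast, hne]
          have hB : pvStepTok (tks, cur) ' ' = (tks ++ [cur], []) := by
            simp [pvStepTok, hcur, (show PySem.Chars.isalnum ' ' = false by decide)]
          rw [hA, hB]
          refine ih (f ++ [' ']) (tks ++ [cur]) [] (by simp) ?_ ?_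
          · rw [tokSplit_append_space, h2]
          · simp
      · by_cases hdg : PySem.Chars.isdigit c = true
        · -- digit (allow_digit): A appends, B extends cur
          obtain ⟨last, hlast⟩ : ∃ l, f.getLast? = some l := by
            cases hf : f.getLast? with
            | none => exact absurd (List.getLast?_eq_none_iff.mp hf) h1
            | some l => exact ⟨l, rfl⟩
          have hA : pvStepA true (some f) c = some (f ++ [c]) := by
            simp [pvStepA, ha, pyGet?_neg_one, hlast, hsp, hdg]
          have hB : pvStepTok (tks, cur) c = (tks, cur ++ [c]) := by
            simp [pvStepTok, PySem.Chars.isalnum, ha, hdg]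
          rw [hA, hB]
          apply ih (f ++ [c]) tks (cur ++ [c]) (by simp)
          · rw [tokSplit_append_char f c hsp, h2, modLast_append]
          · simp [List.getLast?_concat, hsp]
        · -- other char: both sides unchanged
          obtain ⟨last, hlast⟩ : ∃ l, f.getLast? = some l := by
            cases hf : f.getLast? with
            | none => exact absurd (List.getLast?_eq_none_iff.mp hf) h1
            | some l => exact ⟨l, rfl⟩
          have hA : pvStepA true (some f) c = some f := by
            simp [pvStepA, ha, pyGet?_neg_one, hlast, hsp, hdg]
          have hB : pvStepTok (tks, cur) c = (tks, cur) := by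
            simp [pvStepTok, PySem.Chars.isalnum, ha, hdg, hsp]
          rw [hA, hB]
          exact ih f tks cur h1 h2 h3

lemma tokens_eq (term0 : List Char)
    (h1 : PySem.Chars.strip term0 ≠ [])
    (h2 : PySem.Chars.isalpha (PySem.Chars.strip term0).headI = true) :
    ∃ f, pvOnlyLetters term0 true = some f ∧
      PySem.Chars.splitOn f [' '] =
        (let st := (PySem.Chars.strip term0).foldl pvStepTok ([], []);
         if st.2 ≠ [] then st.1 ++ [st.2] else st.1) := by
  rcases hs : PySem.Chars.strip term0 with _ | ⟨c, rest⟩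
  · exact absurd hs h1
  · rw [hs] at h2
    simp only [List.headI] at h2
    have hc : c ≠ ' ' := isalpha_ne_space h2
    have hstepA : pvStepA true (some []) c = some [c] := by simp [pvStepA, h2]
    have hstepB : pvStepTok ([], ([] : List Char)) c = ([], [c]) := by
      simp [pvStepTok, PySem.Chars.isalnum, h2]
    obtain ⟨f', hfold, hne, htok, hiff⟩ :=
      loops_agree rest [c] [] [c] (by simp) (by simp [tokSplit, if_neg hc]) (by simp [hc])
    obtain ⟨last, hlast⟩ : ∃ l, f'.getLast? = some l := by
      cases hf : f'.getLast? with
      | none => exact absurd (List.getLast?_eq_none_iff.mp hf) hne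
      | some l => exact ⟨l, rfl⟩
    have hout : pvOnlyLetters term0 true
        = some (if last = ' ' then f'.dropLast else f') := by
      unfold pvOnlyLetters
      rw [hs]
      simp only [List.foldl_cons, hstepA, hfold]
      rw [pyGet?_neg_one, hlast, PySem.List.slice_to_neg_one]
    refine ⟨_, hout, ?_⟩
    simp only [List.foldl_cons, hstepB]
    by_cases hl : last = ' '
    · subst hl
      have hcur : (rest.foldl pvStepTok ([], [c])).2 = [] := hiff.mp hlast
      rw [if_pos rfl, splitOn_eq_tokSplit]
      have hfd : f'.dropLast ++ [' '] = f' := List.dropLast_append_getLast? ' ' hlast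
      have hx : tokSplit f'.dropLast ++ [[]] = (rest.foldl pvStepTok ([], [c])).1 ++ [[]] := by
        rw [← tokSplit_append_space, hfd, htok, hcur]
      simp only [hcur, ne_eq, not_true_eq_false, if_neg, not_false_iff]
      simpa using hx
    · rw [if_neg hl, splitOn_eq_tokSplit, htok]
      have hcur : (rest.foldl pvStepTok ([], [c])).2 ≠ [] := by
        intro hE
        rw [hiff.mpr hE] at hlast
        exact hl (Option.some.inj hlast).symm
      simp [hcur]

-- ---- distance side ----

def omin : Option Int → Option Int → Option Int
  | none, b => b
  | a, none => a
  | some x, some y => some (min x y)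

def M (xs : List Int) : Option Int := xs.foldr (fun x a => omin (some x) a) none

def idcs (ts : List (List Char)) (t : List Char) : List Int :=
  ((PySem.List.enumerate ts 0).filter (fun p => p.2 == t)).map (fun p => p.1)

def diffs (I1 I2 : List Int) : List Int := I1.flatMap (fun i => I2.map (fun j => |i - j|))

lemma omin_none_left (a : Option Int) : omin none a = a := by cases a <;> rfl
lemma omin_none_right (a : Option Int) : omin a none = a := by cases a <;> rfl
lemma omin_comm (a b : Option Int) : omin a b = omin b a := by
  cases a <;> cases b <;> simp [omin, min_comm]
lemma omin_assoc (a b c : Option Int) : omin (omin a b) c = omin a (omin b c) := by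
  cases a <;> cases b <;> cases c <;> simp [omin, min_assoc]
lemma omin_left_comm (a b c : Option Int) : omin a (omin b c) = omin b (omin a c) := by
  rw [← omin_assoc, omin_comm a b, omin_assoc]

lemma M_append (xs ys : List Int) : M (xs ++ ys) = omin (M xs) (M ys) := by
  induction xs with
  | nil => simp [M, omin]
  | cons x xs ih => simp only [List.cons_append, M, List.foldr_cons] at *; rw [ih, omin_assoc]

lemma foldl_omin_eq (xs : List Int) : ∀ a : Option Int,
    xs.foldl (fun acc x => omin acc (some x)) a = omin a (M xs) := by
  induction xs with
  | nil => intro a; simp [M, omin_none_right]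
  | cons x xs ih =>
    intro a
    simp only [List.foldl_cons]
    rw [ih, omin_assoc]
    rfl

lemma min?_eq_M (xs : List Int) : PySem.List.min? xs (fun x => x) = M xs := by
  unfold PySem.List.min?
  rw [PySem.List.foldl_congr_mem xs _ (fun acc x => omin acc (some x)) none ?_,
    foldl_omin_eq xs none, omin_none_left]
  intro acc x _
  cases acc with
  | none => rfl
  | some m =>
    simp only [omin]
    split <;> congr 1 <;> omega

lemma M_spec (xs : List Int) (h : xs ≠ []) : ∃ m, M xs = some m ∧ m ∈ xs ∧ ∀ y ∈ xs, m ≤ y := by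
  induction xs with
  | nil => exact absurd rfl h
  | cons x xs ih =>
    cases xs with
    | nil => exact ⟨x, rfl, by simp, by simp⟩
    | cons b bs =>
      obtain ⟨m, hm, hmem, hle⟩ := ih (by simp)
      refine ⟨min x m, ?_, ?_, ?_⟩
      · show omin (some x) (M (b :: bs)) = some (min x m)
        rw [hm]; rfl
      · rcases min_choice x m with hc | hc <;> rw [hc] <;> simp [hmem]
      · intro y hy
        rcases List.mem_cons.mp hy with h | h
        · subst h; exact min_le_left _ _
        · exact le_trans (min_le_right x m) (hle y h)

lemma M_eq_of {xs : List Int} {m : Int} (hm : m ∈ xs) (hle : ∀ y ∈ xs, m ≤ y) : M xs = some m := by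
  obtain ⟨m', h1, h2, h3⟩ := M_spec xs (by rintro rfl; simp at hm)
  rw [h1]; exact congrArg some (le_antisymm (h3 m hm) (hle m' h2))

lemma M_map_abs (J : List Int) (k n : Int) (hJ : J.getLast? = some k)
    (hb : ∀ j ∈ J, j ≤ k) (hk : k ≤ n) :
    M (J.map (fun j => |n - j|)) = some (n - k) := by
  apply M_eq_of
  · have : k ∈ J := List.mem_of_getLast? hJ
    have : |n - k| = n - k := abs_of_nonneg (by omega)
    exact List.mem_map.mpr ⟨k, List.mem_of_getLast? hJ, this⟩
  · intro y hy
    obtain ⟨j, hj, rfl⟩ := List.mem_map.mp hy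
    have := hb j hj
    have h1 : |n - j| = n - j := abs_of_nonneg (by omega)
    omega

lemma idcs_append (ts : List (List Char)) (t t1 : List Char) :
    idcs (ts ++ [t]) t1 = idcs ts t1 ++ (if t == t1 then [(ts.length : Int)] else []) := by
  unfold idcs
  rw [PySem.List.enumerate_append]
  simp only [PySem.List.enumerate_cons, PySem.List.enumerate_nil, List.filter_append,
    List.map_append, zero_add]
  by_cases h : t == t1
  · simp [h]
  · simp [h]

lemma idcs_lt (ts : List (List Char)) (t1 : List Char) :
    ∀ i ∈ idcs ts t1, 0 ≤ i ∧ i < (ts.length : Int) := by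
  intro i hi
  unfold idcs at hi
  obtain ⟨p, hp, rfl⟩ := List.mem_map.mp hi
  have hpe := (List.mem_filter.mp hp).1
  obtain ⟨k, hk, rfl⟩ := (PySem.List.mem_enumerate_iff ts 0 p).mp hpe
  simp only [zero_add]
  omega

lemma idcs_le_getLast (ts : List (List Char)) (t1 : List Char) :
    ∀ j ∈ idcs ts t1, ∀ k, (idcs ts t1).getLast? = some k → j ≤ k := by
  induction ts using List.reverseRecOn with
  | nil => intro j hj; simp [idcs, PySem.List.enumerate_nil] at hj
  | append_singleton ts t ih =>
    intro j hj k hk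
    rw [idcs_append] at hj hk
    by_cases ht : t == t1
    · rw [if_pos ht] at hj hk
      rw [List.getLast?_concat] at hk
      injection hk with hk
      subst hk
      rcases List.mem_append.mp hj with hj | hj
      · exact le_of_lt ((idcs_lt ts t1 j hj).2)
      · simp at hj; omega
    · rw [if_neg ht, List.append_nil] at hj hk
      exact ih j hj k hk

lemma pvUpd_eq_omin (best last : Option Int) (i : Int) :
    pvUpd best last i = omin best (last.map (fun j => i - j)) := by
  cases last <;> cases best <;> simp [pvUpd, omin, Option.map]
  split <;> simp <;> omega

lemma diffs_append_fst (I1 I2 : List Int) (n : Int) :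
    M (diffs (I1 ++ [n]) I2) = omin (M (diffs I1 I2)) (M (I2.map (fun j => |n - j|))) := by
  simp only [diffs, List.flatMap_append, List.flatMap_cons, List.flatMap_nil, List.append_nil]
  rw [M_append]

lemma diffs_append_snd (I1 I2 : List Int) (n : Int) :
    M (diffs I1 (I2 ++ [n])) = omin (M (diffs I1 I2)) (M (I1.map (fun i => |i - n|))) := by
  induction I1 with
  | nil => simp [diffs, M, omin]
  | cons i I1 ih =>
    simp only [diffs, List.flatMap_cons, List.map_append, List.map_cons, List.map_nil] at *
    rw [M_append, M_append, ih, M_append]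
    simp only [M, List.foldr_cons, List.foldr_nil, omin_none_right]
    rw [omin_assoc, omin_left_comm (some |i - n|), ← omin_assoc]

lemma M_map_lastD (I : List Int) (n : Int) (hlt : ∀ j ∈ I, j ≤ n)
    (hle : ∀ j ∈ I, ∀ k, I.getLast? = some k → j ≤ k) :
    M (I.map (fun j => |n - j|)) = I.getLast?.map (fun j => n - j) := by
  cases hI : I.getLast? with
  | none => rw [List.getLast?_eq_none_iff.mp hI]; rfl
  | some k =>
    simp only [Option.map_some]
    exact M_map_abs I k n hI (fun j hj => hle j hj k hI) (hlt k (List.mem_of_getLast? hI))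

-- the one-pass loop computes exactly (min over all pairs, last index of t1, last index of t2)
lemma loop2 (t1 t2 : List Char) (ts : List (List Char)) :
    (PySem.List.enumerate ts 0).foldl (pvStepDist t1 t2) (none, none, none)
      = (M (diffs (idcs ts t1) (idcs ts t2)), (idcs ts t1).getLast?, (idcs ts t2).getLast?) := by
  induction ts using List.reverseRecOn with
  | nil => simp [idcs, diffs, M, PySem.List.enumerate_nil]
  | append_singleton ts t ih =>
    have habs : ∀ (I : List Int), (I.map (fun i => |i - (ts.length : Int)|))
        = (I.map (fun j => |(ts.length : Int) - j|)) := by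
      intro I; exact List.map_congr_left (fun i _ => abs_sub_comm i _)
    have hM1 : M ((idcs ts t1).map (fun j => |(ts.length : Int) - j|))
        = (idcs ts t1).getLast?.map (fun j => (ts.length : Int) - j) :=
      M_map_lastD _ _ (fun j hj => le_of_lt (idcs_lt ts t1 j hj).2) (idcs_le_getLast ts t1)
    have hM2 : M ((idcs ts t2).map (fun j => |(ts.length : Int) - j|))
        = (idcs ts t2).getLast?.map (fun j => (ts.length : Int) - j) :=
      M_map_lastD _ _ (fun j hj => le_of_lt (idcs_lt ts t2 j hj).2) (idcs_le_getLast ts t2)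
    rw [PySem.List.enumerate_append]
    simp only [PySem.List.enumerate_cons, PySem.List.enumerate_nil, zero_add]
    rw [List.foldl_append, ih]
    simp only [List.foldl_cons, List.foldl_nil]
    unfold pvStepDist
    simp only []
    rw [idcs_append, idcs_append]
    by_cases h1 : t == t1 <;> by_cases h2 : t == t2 <;>
      simp only [h1, h2, if_pos, if_neg, Bool.false_eq_true, not_false_iff, if_true, if_false,
        List.append_nil, pvUpd_eq_omin]
    · -- t matches both tokens
      rw [diffs_append_snd, diffs_append_fst, hM2]
      have hL : M (((idcs ts t1) ++ [(ts.length : Int)]).map (fun j => |(ts.length : Int) - j|))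
          = some ((ts.length : Int) - (ts.length : Int)) := by
        apply M_map_abs _ ((ts.length : Int)) _ List.getLast?_concat
        · intro j hj
          rcases List.mem_append.mp hj with hj | hj
          · exact le_of_lt (idcs_lt ts t1 j hj).2
          · simp at hj; omega
        · omega
      rw [habs (idcs ts t1 ++ [(ts.length : Int)]), hL]
      simp only [List.getLast?_concat, Option.map_some]
    · -- t matches token_1 only
      rw [diffs_append_fst, hM2, List.getLast?_concat]
    · -- t matches token_2 only
      rw [diffs_append_snd, habs, hM1, List.getLast?_concat]

lemma diffs_nil_right (I1 : List Int) : diffs I1 [] = [] := by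
  simp [diffs]

-- ===== VERDICT (by name: the statement is the Claim_ definition above) =====
lemma alt_eq (token_1 token_2 term : String) :
    compute_distance_alt token_1 token_2 term =
      ((PySem.List.enumerate
          (let st := (PySem.Chars.strip (PySem.Chars.lower term.toList)).foldl pvStepTok ([], []);
           if st.2 ≠ [] then st.1 ++ [st.2] else st.1) 0).foldl
        (pvStepDist token_1.toList token_2.toList) (none, none, none)).1 := rfl

theorem compute_distance_spec : Claim_equal_compute_distance := by
  unfold Claim_equal_compute_distance
  intro token_1 token_2 term _ hpre
  unfold Spec_compute_distance
  obtain ⟨h1, h2⟩ := hpre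
  obtain ⟨f, hf, hsplit⟩ := tokens_eq (PySem.Chars.lower term.toList) h1 h2
  rw [alt_eq, ← hsplit]
  unfold compute_distance
  have hlow : (PySem.Str.lower term).toList = PySem.Chars.lower term.toList := by
    simp [pysem]
  rw [hlow, hf]
  simp only []
  rw [loop2]
  set ts := PySem.Chars.splitOn f [' '] with hts
  set I1 := idcs ts token_1.toList with hI1
  set I2 := idcs ts token_2.toList with hI2
  have houter : I1.foldl (fun acc i => I2.foldl (fun acc j => acc ++ [|i - j|]) acc) []
      = diffs I1 I2 := by
    rw [List.foldl_ext _ (fun acc i => acc ++ I2.map (fun j => |i - j|)) []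
      (fun acc i _ => PySem.List.foldl_append_singleton_eq_map _ I2 acc),
      PySem.List.foldl_append_eq_flatMap]
    rfl
  show (if I1 ≠ [] ∧ I2 ≠ [] then
      PySem.List.min? (I1.foldl (fun acc i => I2.foldl (fun acc j => acc ++ [|i - j|]) acc) []) (fun x => x)
    else none) = M (diffs I1 I2)
  by_cases hc : I1 ≠ [] ∧ I2 ≠ []
  · rw [if_pos hc, houter, min?_eq_M]
  · rw [if_neg hc]
    push_neg at hc
    by_cases hn1 : I1 = []
    · rw [hn1]; rfl
    · rw [hc hn1, diffs_nil_right]; rfl
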